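-- pv_equiv track=rewrite | github.com/ssumin6/dpll | solvepy2.py | clause_strip
-- ===== SOURCE A (Python) =====
-- def clause_strip(clause):
--     #used in parsing the DIMACS format input
--     ret = []
--     tmp = []
--     for i in clause:
--         if (i == '0'):
--             ret.append(tmp)
--             tmp = []
--         elif (i == '%'):
--             break
--         else:
--             tmp.append(int(i))
--     return ret
-- ===== SOURCE B (Python) =====
-- def clause_strip(clause):
--     # Different decomposition: truncate at the first '%', then repeatedly cut at
--     # the next '0' delimiter and convert each finished segment; the trailing
--     # unterminated segment is never converted.
--     try:
--         live = clause[:clause.index('%')]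
--     except ValueError:
--         live = clause
--     out = []
--     while '0' in live:
--         z = live.index('0')
--         out.append([int(t) for t in live[:z]])
--         live = live[z+1:]
--     return out
-- ===== Notes on version B (the rewrite author's own statement) =====
-- stated objective: alternative
-- what changed: A's single accumulate-and-flush pass with (ret, tmp) state is replaced by truncating the token list at the first '%' and then repeatedly cutting at the next '0' delimiter, converting each finished segment with a per-segment map; the trailing unterminated segment is never converted.
import Mathlib
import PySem

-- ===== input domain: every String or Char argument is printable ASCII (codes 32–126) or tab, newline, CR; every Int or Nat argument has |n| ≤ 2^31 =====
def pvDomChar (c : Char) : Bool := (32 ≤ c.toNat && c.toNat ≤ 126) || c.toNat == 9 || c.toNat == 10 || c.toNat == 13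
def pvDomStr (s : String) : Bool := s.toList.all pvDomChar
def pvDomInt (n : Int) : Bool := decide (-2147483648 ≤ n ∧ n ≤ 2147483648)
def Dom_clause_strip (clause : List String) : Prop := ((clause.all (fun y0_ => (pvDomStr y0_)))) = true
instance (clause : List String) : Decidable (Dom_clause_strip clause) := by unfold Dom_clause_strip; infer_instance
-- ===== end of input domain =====

-- B replaces A's single accumulate-and-flush pass by truncate-at-'%' then repeated cut-at-next-'0' (simpler decomposition, same cost).

-- ===== PORT A =====
-- the for-loop with its two pieces of state (ret, tmp); 'break' at '%' returns ret
def clauseStripGo : List String → List (List Int) → List Int → List (List Int)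
  | [], ret, _tmp => ret
  | i :: rest, ret, tmp =>
    if i = "0" then clauseStripGo rest (ret ++ [tmp]) []
    else if i = "%" then ret
    else match PySem.Int.ofStr? i with
      | some n => clauseStripGo rest ret (tmp ++ [n])
      | none => ret   -- int(i) raises ValueError: excluded by Pre_clause_strip

def clause_strip (clause : List String) : List (List Int) :=
  clauseStripGo clause [] []

-- ===== PORT B =====
-- the while loop: cut at the next '0' (live[:z] = take z, live[z+1:] = drop (z+1), nonnegative slices)
def clauseStripChunks (live : List String) : List (List Int) :=
  match h : PySem.List.index? live "0" with
  | none => []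
  | some z =>
      ((live.take z).map (fun t => (PySem.Int.ofStr? t).getD 0)) ::
        clauseStripChunks (live.drop (z + 1))
termination_by live.length
decreasing_by
  obtain ⟨hk, -, -⟩ := PySem.List.getElem_of_index?_eq_some h
  simp only [List.length_drop]; omega

def clause_strip_alt (clause : List String) : List (List Int) :=
  -- clause[:clause.index('%')] when '%' occurs, else clause (nonnegative slice = take)
  let live := match PySem.List.index? clause "%" with
    | some k => clause.take k
    | none => clause
  clauseStripChunks live

-- ===== PRECONDITION & SPEC =====
-- Pre_ excludes exactly the inputs where A raises ValueError: a token before the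
-- first '%' that is not '0' and not a Python int literal.
def Pre_clause_strip (clause : List String) : Prop :=
  ∀ s ∈ clause.takeWhile (fun s => s ≠ "%"), s ≠ "0" → (PySem.Int.ofStr? s).isSome = true
instance (clause : List String) : Decidable (Pre_clause_strip clause) := by
  unfold Pre_clause_strip; infer_instance
def pvWitness_clause_strip : List String := ["1", "-2", "0", "3", "0", "4"]
def Spec_clause_strip (clause : List String) (out : List (List Int)) : Prop := out = clause_strip_alt clause
instance (clause : List String) (out : List (List Int)) : Decidable (Spec_clause_strip clause out) := by unfold Spec_clause_strip; infer_instance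

-- ===== CLAIM (what is proved, stated in full; the proofs are below) =====
def Claim_equal_clause_strip : Prop := ∀ (clause : List String), Dom_clause_strip clause → Pre_clause_strip clause → Spec_clause_strip clause (clause_strip clause)

-- ===== LEMMAS AND PROOFS =====

-- unfolding equation for the well-founded chunks loop
theorem chunks_eq (live : List String) :
    clauseStripChunks live =
      match PySem.List.index? live "0" with
      | none => []
      | some z =>
          ((live.take z).map (fun t => (PySem.Int.ofStr? t).getD 0)) ::
            clauseStripChunks (live.drop (z + 1)) := by
  rw [clauseStripChunks]
  cases h : PySem.List.index? live "0" <;> simp only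

-- ret is only ever appended to
theorem go_acc (l : List String) (ret : List (List Int)) (tmp : List Int) :
    clauseStripGo l ret tmp = ret ++ clauseStripGo l [] tmp := by
  induction l generalizing ret tmp with
  | nil => simp [clauseStripGo]
  | cons i rest ih =>
    by_cases h0 : i = "0"
    · simp only [clauseStripGo, if_pos h0]
      rw [ih (ret ++ [tmp]), ih ([] ++ [tmp])]
      simp
    · by_cases hp : i = "%"
      · simp [clauseStripGo, hp]
      · simp only [clauseStripGo, if_neg h0, if_neg hp]
        cases PySem.Int.ofStr? i with
        | none => simp
        | some n =>
          rw [show ∀ r t, (match (some n : Option Int) with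
                | some m => clauseStripGo rest r (t ++ [m])
                | none => r) = clauseStripGo rest r (t ++ [n]) from fun _ _ => rfl,
              show (match (some n : Option Int) with
                | some m => clauseStripGo rest [] (tmp ++ [m])
                | none => ([] : List (List Int))) = clauseStripGo rest [] (tmp ++ [n]) from rfl]
          exact ih ret (tmp ++ [n])

-- A's loop only ever sees the prefix before the first '%'
theorem go_trunc (l : List String) (ret : List (List Int)) (tmp : List Int) :
    clauseStripGo l ret tmp = clauseStripGo (l.takeWhile (fun s => s ≠ "%")) ret tmp := by
  induction l generalizing ret tmp with
  | nil => simp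
  | cons i rest ih =>
    by_cases hp : i = "%"
    · subst hp
      simp [clauseStripGo]
    · have ht : ((i :: rest).takeWhile (fun s => s ≠ "%")) =
          i :: rest.takeWhile (fun s => s ≠ "%") := by
        simp [hp]
      rw [ht]
      by_cases h0 : i = "0"
      · simp only [clauseStripGo, if_pos h0]
        exact ih _ _
      · simp only [clauseStripGo, if_neg h0, if_neg hp]
        cases PySem.Int.ofStr? i with
        | none => rfl
        | some n => exact ih _ _

-- B's truncation equals A's takeWhile prefix
theorem live_eq (clause : List String) :
    (match PySem.List.index? clause "%" with
      | some k => clause.take k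
      | none => clause) = clause.takeWhile (fun s => s ≠ "%") := by
  induction clause with
  | nil => simp [PySem.List.index?]
  | cons i rest ih =>
    by_cases hp : i = "%"
    · subst hp
      rw [PySem.List.index?_cons_self]
      simp [List.takeWhile]
    · have hcons : ((i :: rest).takeWhile (fun s => s ≠ "%")) =
          i :: rest.takeWhile (fun s => s ≠ "%") := by simp [hp]
      rw [hcons, ← ih, PySem.List.index?_cons_of_ne rest hp]
      cases h : PySem.List.index? rest "%" with
      | none => simp
      | some k => simp

-- main invariant: on a '%'-free, all-parsing prefix, A's loop with pending tmp
-- produces the chunk decomposition with tmp prepended to the first chunk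
theorem key (live : List String)
    (hnp : ∀ s ∈ live, s ≠ "%")
    (hok : ∀ s ∈ live, s ≠ "0" → (PySem.Int.ofStr? s).isSome = true) :
    ∀ tmp, clauseStripGo live [] tmp =
      match PySem.List.index? live "0" with
      | none => []
      | some z =>
          (tmp ++ (live.take z).map (fun t => (PySem.Int.ofStr? t).getD 0)) ::
            clauseStripChunks (live.drop (z + 1)) := by
  induction live with
  | nil => intro tmp; simp [clauseStripGo, PySem.List.index?]
  | cons i rest ih =>
    intro tmp
    have hnp' : ∀ s ∈ rest, s ≠ "%" := fun s hs => hnp s (List.mem_cons_of_mem _ hs)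
    have hok' : ∀ s ∈ rest, s ≠ "0" → (PySem.Int.ofStr? s).isSome = true :=
      fun s hs => hok s (List.mem_cons_of_mem _ hs)
    by_cases h0 : i = "0"
    · subst h0
      rw [PySem.List.index?_cons_self]
      simp only [clauseStripGo, reduceIte]
      rw [go_acc, ih hnp' hok' []]
      simp only [List.nil_append]
      rw [← chunks_eq rest]
      simp
    · have hp : i ≠ "%" := hnp i List.mem_cons_self
      have hsome := hok i List.mem_cons_self h0
      obtain ⟨n, hn⟩ := Option.isSome_iff_exists.mp hsome
      simp only [clauseStripGo, if_neg h0, if_neg hp, hn]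
      rw [PySem.List.index?_cons_of_ne rest h0]
      rw [ih hnp' hok' (tmp ++ [n])]
      cases PySem.List.index? rest "0" with
      | none => simp
      | some z =>
        simp only [Option.map_some, List.take_succ_cons, List.map_cons, hn,
          Option.getD_some, List.drop_succ_cons]
        simp

-- ===== VERDICT (by name: the statement is the Claim_ definition above) =====
theorem clause_strip_spec : Claim_equal_clause_strip := by
  intro clause _hdom hpre
  unfold Spec_clause_strip clause_strip clause_strip_alt
  rw [live_eq, go_trunc]
  set live := clause.takeWhile (fun s => s ≠ "%") with hlive
  have hnp : ∀ s ∈ live, s ≠ "%" := by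
    intro s hs
    have := List.mem_takeWhile_imp (by simpa [hlive] using hs)
    simpa using this
  have hok : ∀ s ∈ live, s ≠ "0" → (PySem.Int.ofStr? s).isSome = true := by
    intro s hs
    exact hpre s (by simpa [hlive] using hs)
  rw [key live hnp hok []]
  rw [chunks_eq live]
  cases PySem.List.index? live "0" with
  | none => rfl
  | some z => simp
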